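-- pv_equiv track=rewrite | github.com/MisterMath0/n8n-automated | backend/app/services/text_processor.py | _apply_basic_stemming
-- ===== SOURCE A (Python) =====
-- from typing import List, Dict, Any
--
-- def _apply_basic_stemming(tokens: List[str]) -> List[str]:
--     """
--     Apply basic stemming to tokens.
--
--     This is a simple rule-based stemmer. For production use,
--     consider using a proper stemming library like NLTK Porter Stemmer.
--     """
--     stemmed = []
--     for token in tokens:
--         # Remove common suffixes
--         if token.endswith('ing') and len(token) > 5:
--             token = token[:-3]
--         elif token.endswith('ed') and len(token) > 4:
--             token = token[:-2]
--         elif token.endswith('er') and len(token) > 4: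
--             token = token[:-2]
--         elif token.endswith('est') and len(token) > 5:
--             token = token[:-3]
--         elif token.endswith('ly') and len(token) > 4:
--             token = token[:-2]
--         elif token.endswith('s') and len(token) > 3 and not token.endswith('ss'):
--             token = token[:-1]
--
--         stemmed.append(token)
--
--     return stemmed
-- ===== SOURCE B (Python) =====
-- from typing import List
--
-- # Every suffix rule ends in a distinct final character ('g','d','r','t','y','s'),
-- # so at most ONE rule can ever apply to a token: instead of testing the rules in
-- # sequence, dispatch once on the token's last character.
-- _BY_LAST = {
--     'g': ('ing', 5),
--     'd': ('ed', 4),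
--     'r': ('er', 4),
--     't': ('est', 5),
--     'y': ('ly', 4),
-- }
--
-- def _stem_token(token: str) -> str:
--     rule = _BY_LAST.get(token[-1:])
--     if rule is None:
--         # the 's' rule (or no rule at all)
--         if len(token) > 3 and token.endswith('s') and not token.endswith('ss'):
--             return token[:-1]
--         return token
--     suffix, min_len = rule
--     if len(token) > min_len and token.endswith(suffix):
--         return token[:-len(suffix)]
--     return token
--
-- def _apply_basic_stemming(tokens: List[str]) -> List[str]:
--     return [_stem_token(t) for t in tokens]
-- ===== Notes on version B (the rewrite author's own statement) =====
-- stated objective: alternative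
-- what changed: Replaces A's six-test if/elif suffix cascade with a single dispatch on the token's last character (all rule suffixes end in distinct characters, so at most one rule can apply): one dict lookup selects the only candidate rule, which is then checked and applied.
import Mathlib
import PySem

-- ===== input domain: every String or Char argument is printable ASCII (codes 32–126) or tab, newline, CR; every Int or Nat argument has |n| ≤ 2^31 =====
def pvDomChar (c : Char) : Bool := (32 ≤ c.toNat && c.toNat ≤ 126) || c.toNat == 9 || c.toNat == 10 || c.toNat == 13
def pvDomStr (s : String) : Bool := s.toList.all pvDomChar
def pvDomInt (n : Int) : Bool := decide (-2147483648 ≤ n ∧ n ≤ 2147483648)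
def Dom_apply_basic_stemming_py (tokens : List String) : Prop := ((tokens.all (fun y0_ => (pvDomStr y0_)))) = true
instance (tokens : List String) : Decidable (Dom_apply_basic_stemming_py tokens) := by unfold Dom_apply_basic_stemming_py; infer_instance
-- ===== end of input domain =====

-- B replaces A's six-test if/elif suffix cascade with a single dispatch on the token's last
-- character (every rule suffix ends in a distinct character, so at most one rule can apply); same cost.

-- ===== PORT A =====
-- the if/elif chain of A's loop body, applied to one token
def pvStemA (token : String) : String :=
  if PySem.Str.endswith token "ing" && decide (PySem.Str.len token > 5) then
    PySem.Str.slice token none (some (-3))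
  else if PySem.Str.endswith token "ed" && decide (PySem.Str.len token > 4) then
    PySem.Str.slice token none (some (-2))
  else if PySem.Str.endswith token "er" && decide (PySem.Str.len token > 4) then
    PySem.Str.slice token none (some (-2))
  else if PySem.Str.endswith token "est" && decide (PySem.Str.len token > 5) then
    PySem.Str.slice token none (some (-3))
  else if PySem.Str.endswith token "ly" && decide (PySem.Str.len token > 4) then
    PySem.Str.slice token none (some (-2))
  else if PySem.Str.endswith token "s" && decide (PySem.Str.len token > 3) && !PySem.Str.endswith token "ss" then
    PySem.Str.slice token none (some (-1))
  else token

def apply_basic_stemming_py (tokens : List String) : List String :=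
  tokens.foldl (fun stemmed token => stemmed ++ [pvStemA token]) []

-- ===== PORT B =====
-- _BY_LAST: the rule table keyed by the token's last character (as a 1-char string)
def pvByLast : PySem.Dict String (String × Nat) :=
  PySem.Dict.ofList [("g", ("ing", 5)), ("d", ("ed", 4)), ("r", ("er", 4)), ("t", ("est", 5)), ("y", ("ly", 4))]

-- _stem_token: one dict lookup on token[-1:] selects the only candidate rule
def pvStemB (token : String) : String :=
  match pvByLast.get? (PySem.Str.slice token (some (-1)) none) with
  | none =>
    if decide (PySem.Str.len token > 3) && PySem.Str.endswith token "s" && !PySem.Str.endswith token "ss" then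
      PySem.Str.slice token none (some (-1))
    else token
  | some (suffix, minLen) =>
    if decide (PySem.Str.len token > (minLen : Int)) && PySem.Str.endswith token suffix then
      PySem.Str.slice token none (some (-(PySem.Str.len suffix)))
    else token

def apply_basic_stemming_py_alt (tokens : List String) : List String :=
  tokens.map pvStemB

-- ===== PRECONDITION & SPEC =====
def Spec_apply_basic_stemming_py (tokens : List String) (out : List String) : Prop := out = apply_basic_stemming_py_alt tokens
instance (tokens : List String) (out : List String) : Decidable (Spec_apply_basic_stemming_py tokens out) := by unfold Spec_apply_basic_stemming_py; infer_instance

-- ===== CLAIM =====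
def Claim_equal_apply_basic_stemming_py : Prop := ∀ (tokens : List String), Dom_apply_basic_stemming_py tokens → Spec_apply_basic_stemming_py tokens (apply_basic_stemming_py tokens)

-- ===== LEMMAS AND PROOFS =====
-- lookup in the literal rule table, as an if-chain on the key
theorem get?_pvByLast (k : String) : pvByLast.get? k =
    if "g" = k then some ("ing", 5) else if "d" = k then some ("ed", 4)
    else if "r" = k then some ("er", 4) else if "t" = k then some ("est", 5)
    else if "y" = k then some ("ly", 4) else none := by
  have h : pvByLast = PySem.Dict.mk [("g", ("ing", 5)), ("d", ("ed", 4)), ("r", ("er", 4)), ("t", ("est", 5)), ("y", ("ly", 4))] := by decide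
  rw [h]; simp only [PySem.Dict.get?_mk_cons, beq_iff_eq]; rfl

-- endswith as a prefix test on the reversed character list
theorem pvEndswith_reverse (s : String) (p : String) :
    (PySem.Str.endswith s p) = decide (p.toList.reverse <+: s.toList.reverse) := by
  rw [Bool.eq_iff_iff, decide_eq_true_iff, List.reverse_prefix, PySem.Str.endswith_eq]
  exact PySem.Chars.endswith_iff _ _

-- per-token equivalence: A's cascade = B's last-character dispatch
theorem pvStem_eq (t : String) : pvStemA t = pvStemB t := by
  have hkey : (PySem.Str.slice t (some (-1)) none).toList = t.toList.drop (t.toList.length - 1) := by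
    simp [PySem.List.slice_from_neg_one]
  rcases hr : t.toList.reverse with _ | ⟨a, r⟩
  · have hl : t.toList = [] := by simpa using congrArg List.reverse hr
    have hklist : (PySem.Str.slice t (some (-1)) none).toList = [] := by rw [hkey, hl]; rfl
    have hne : ∀ w : String, w.toList ≠ [] → ¬(w = PySem.Str.slice t (some (-1)) none) :=
      fun w hw h => hw (by rw [h, hklist])
    unfold pvStemA pvStemB
    rw [get?_pvByLast]
    rw [if_neg (hne "g" (by decide)), if_neg (hne "d" (by decide)), if_neg (hne "r" (by decide)),
        if_neg (hne "t" (by decide)), if_neg (hne "y" (by decide))]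
    simp [hl]
  · have hl : t.toList = r.reverse ++ [a] := by simpa using congrArg List.reverse hr
    have hklist : (PySem.Str.slice t (some (-1)) none).toList = [a] := by
      rw [hkey, hl]; simp
    have hkc : ∀ (w : String), (w = PySem.Str.slice t (some (-1)) none) ↔ w.toList = [a] := by
      intro w; rw [← String.toList_inj, hklist]
    have hlen : PySem.Str.len t = (r.length : Int) + 1 := by
      simp [PySem.Str.len_eq, hl]
    unfold pvStemA pvStemB
    rw [get?_pvByLast]
    simp only [hkc, pvEndswith_reverse, hr, hlen]
    by_cases hg : a = 'g'
    · subst hg; simp [List.cons_prefix_cons, and_comm]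
    · by_cases hd : a = 'd'
      · subst hd; simp [List.cons_prefix_cons, and_comm]
      · by_cases hR : a = 'r'
        · subst hR; simp [List.cons_prefix_cons, and_comm]
        · by_cases ht : a = 't'
          · subst ht; simp [List.cons_prefix_cons, and_comm]
          · by_cases hy : a = 'y'
            · subst hy; simp [List.cons_prefix_cons, and_comm]
            · by_cases hs : a = 's'
              · subst hs; simp [List.cons_prefix_cons, and_comm, Ne.symm hg, Ne.symm hd,
                  Ne.symm hR, Ne.symm ht, Ne.symm hy]
              · simp [List.cons_prefix_cons, Ne.symm hg, Ne.symm hd, Ne.symm hR, Ne.symm ht,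
                  Ne.symm hy, Ne.symm hs]

-- ===== VERDICT =====
theorem apply_basic_stemming_py_spec : Claim_equal_apply_basic_stemming_py := by
  intro tokens _
  unfold Spec_apply_basic_stemming_py apply_basic_stemming_py apply_basic_stemming_py_alt
  rw [PySem.List.foldl_append_singleton_eq_map]
  simp [pvStem_eq]
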